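-- pv_equiv track=rewrite | github.com/Anistonworkspace/Aniston-HRMS | ai-service/app/services/validators.py | _types_are_compatible
-- ===== SOURCE A (Python) =====
-- def _types_are_compatible(detected: str, claimed: str) -> bool:
--     """Some document types are semantically compatible (e.g. DL can be in DRIVING_LICENSE slot)."""
--     compat_groups = [
--         {"AADHAAR"},
--         {"PAN"},
--         {"PASSPORT"},
--         {"VOTER_ID"},
--         {"DRIVING_LICENSE"},
--         {"CERTIFICATE", "TENTH_CERTIFICATE", "TWELFTH_CERTIFICATE", "DEGREE_CERTIFICATE",
--          "POST_GRADUATION_CERTIFICATE", "PHD_CERTIFICATE"},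
--         {"BANK_STATEMENT", "CANCELLED_CHEQUE"},
--         {"EXPERIENCE_LETTER", "EMPLOYMENT_LETTER", "OFFER_LETTER", "CERTIFICATE"},
--         {"PHOTO", "PASSPORT_PHOTO"},
--     ]
--     for group in compat_groups:
--         if detected in group and claimed in group:
--             return True
--     return False
-- ===== SOURCE B (Python) =====
-- def _types_are_compatible(detected: str, claimed: str) -> bool:
--     """Some document types are semantically compatible (e.g. DL can be in DRIVING_LICENSE slot)."""
--     compat_groups = [
--         ("AADHAAR",),
--         ("PAN",),
--         ("PASSPORT",),
--         ("VOTER_ID",),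
--         ("DRIVING_LICENSE",),
--         ("CERTIFICATE", "TENTH_CERTIFICATE", "TWELFTH_CERTIFICATE", "DEGREE_CERTIFICATE",
--          "POST_GRADUATION_CERTIFICATE", "PHD_CERTIFICATE"),
--         ("BANK_STATEMENT", "CANCELLED_CHEQUE"),
--         ("EXPERIENCE_LETTER", "EMPLOYMENT_LETTER", "OFFER_LETTER", "CERTIFICATE"),
--         ("PHOTO", "PASSPORT_PHOTO"),
--     ]
--     index = {}
--     for i, group in enumerate(compat_groups):
--         for t in group:
--             index.setdefault(t, set()).add(i)
--     return bool(index.get(detected, set()) & index.get(claimed, set()))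
-- ===== Notes on version B (the rewrite author's own statement) =====
-- stated objective: alternative
-- what changed: Replaces the per-call scan over compatibility groups (membership-testing both strings in every group) by an inverted index mapping each document type to the set of group indices containing it, built in one pass; the check becomes two lookups and a set intersection, which also handles CERTIFICATE's double group membership.
import Mathlib
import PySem

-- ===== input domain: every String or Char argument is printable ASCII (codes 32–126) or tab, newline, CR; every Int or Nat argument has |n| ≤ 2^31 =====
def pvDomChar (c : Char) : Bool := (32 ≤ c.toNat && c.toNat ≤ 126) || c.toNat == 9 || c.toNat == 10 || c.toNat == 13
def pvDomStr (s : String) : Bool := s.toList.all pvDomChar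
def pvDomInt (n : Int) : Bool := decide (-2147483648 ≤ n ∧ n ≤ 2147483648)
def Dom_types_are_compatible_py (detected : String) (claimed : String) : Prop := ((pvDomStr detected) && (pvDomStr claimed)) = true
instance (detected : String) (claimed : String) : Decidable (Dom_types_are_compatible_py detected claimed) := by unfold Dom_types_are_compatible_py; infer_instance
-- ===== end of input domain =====

-- B replaces A's per-call scan over the compatibility groups by an inverted index
-- (document type → set of group indices) built once; the check is two lookups and a
-- set intersection (objective: alternative decomposition, similar cost).

-- ===== PORT A =====
-- the list of compatibility groups (Python set literals; used for membership only, so source order is kept)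
def pvGroupsA : List (PySem.Set String) :=
  [PySem.Set.ofList ["AADHAAR"],
   PySem.Set.ofList ["PAN"],
   PySem.Set.ofList ["PASSPORT"],
   PySem.Set.ofList ["VOTER_ID"],
   PySem.Set.ofList ["DRIVING_LICENSE"],
   PySem.Set.ofList ["CERTIFICATE", "TENTH_CERTIFICATE", "TWELFTH_CERTIFICATE", "DEGREE_CERTIFICATE",
                     "POST_GRADUATION_CERTIFICATE", "PHD_CERTIFICATE"],
   PySem.Set.ofList ["BANK_STATEMENT", "CANCELLED_CHEQUE"],
   PySem.Set.ofList ["EXPERIENCE_LETTER", "EMPLOYMENT_LETTER", "OFFER_LETTER", "CERTIFICATE"],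
   PySem.Set.ofList ["PHOTO", "PASSPORT_PHOTO"]]

-- the 'for group in compat_groups: if detected in group and claimed in group: return True' loop
def pvLoopA (detected claimed : String) : List (PySem.Set String) → Bool
  | [] => false
  | g :: rest =>
    if PySem.Set.contains g detected && PySem.Set.contains g claimed then true
    else pvLoopA detected claimed rest

def types_are_compatible_py (detected : String) (claimed : String) : Bool :=
  pvLoopA detected claimed pvGroupsA

-- ===== PORT B =====
-- B's groups are tuples (ordered), ported as lists
def pvGroupsB : List (List String) :=
  [["AADHAAR"],
   ["PAN"],
   ["PASSPORT"],
   ["VOTER_ID"],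
   ["DRIVING_LICENSE"],
   ["CERTIFICATE", "TENTH_CERTIFICATE", "TWELFTH_CERTIFICATE", "DEGREE_CERTIFICATE",
    "POST_GRADUATION_CERTIFICATE", "PHD_CERTIFICATE"],
   ["BANK_STATEMENT", "CANCELLED_CHEQUE"],
   ["EXPERIENCE_LETTER", "EMPLOYMENT_LETTER", "OFFER_LETTER", "CERTIFICATE"],
   ["PHOTO", "PASSPORT_PHOTO"]]

-- 'for i, group in enumerate(compat_groups): for t in group: index.setdefault(t, set()).add(i)'
-- (index.setdefault(t, set()).add(i) stores index.get(t, set()) with i added back at t = Dict.modify)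
def pvIndexB : PySem.Dict String (PySem.Set Int) :=
  (PySem.List.enumerate pvGroupsB).foldl
    (fun d p => p.2.foldl (fun d t => d.modify t PySem.Set.empty (fun s => PySem.Set.add s p.1)) d)
    PySem.Dict.empty

-- 'return bool(index.get(detected, set()) & index.get(claimed, set()))'
def types_are_compatible_py_alt (detected : String) (claimed : String) : Bool :=
  !(PySem.Set.inter (pvIndexB.getD detected PySem.Set.empty)
                    (pvIndexB.getD claimed PySem.Set.empty)).isEmpty

-- ===== PRECONDITION & SPEC =====
def Spec_types_are_compatible_py (detected : String) (claimed : String) (out : Bool) : Prop := out = types_are_compatible_py_alt detected claimed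
instance (detected : String) (claimed : String) (out : Bool) : Decidable (Spec_types_are_compatible_py detected claimed out) := by unfold Spec_types_are_compatible_py; infer_instance

-- ===== CLAIM (what is proved, stated in full; the proofs are below) =====
def Claim_equal_types_are_compatible_py : Prop := ∀ (detected : String) (claimed : String), Dom_types_are_compatible_py detected claimed → Spec_types_are_compatible_py detected claimed (types_are_compatible_py detected claimed)

-- ===== LEMMAS AND PROOFS =====

-- every document-type string mentioned by either program
def pvKeys : List String :=
  ["AADHAAR", "PAN", "PASSPORT", "VOTER_ID", "DRIVING_LICENSE", "CERTIFICATE", "TENTH_CERTIFICATE", "TWELFTH_CERTIFICATE", "DEGREE_CERTIFICATE", "POST_GRADUATION_CERTIFICATE", "PHD_CERTIFICATE", "BANK_STATEMENT", "CANCELLED_CHEQUE", "EXPERIENCE_LETTER", "EMPLOYMENT_LETTER", "OFFER_LETTER", "PHOTO", "PASSPORT_PHOTO"]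

-- the inverted index, fully evaluated
def pvIndexLit : PySem.Dict String (PySem.Set Int) := PySem.Dict.mk
  [("AADHAAR", [0]), ("PAN", [1]), ("PASSPORT", [2]), ("VOTER_ID", [3]), ("DRIVING_LICENSE", [4]),
   ("CERTIFICATE", [5, 7]), ("TENTH_CERTIFICATE", [5]), ("TWELFTH_CERTIFICATE", [5]),
   ("DEGREE_CERTIFICATE", [5]), ("POST_GRADUATION_CERTIFICATE", [5]), ("PHD_CERTIFICATE", [5]),
   ("BANK_STATEMENT", [6]), ("CANCELLED_CHEQUE", [6]),
   ("EXPERIENCE_LETTER", [7]), ("EMPLOYMENT_LETTER", [7]), ("OFFER_LETTER", [7]),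
   ("PHOTO", [8]), ("PASSPORT_PHOTO", [8])]

lemma pvIndexB_eq : pvIndexB = pvIndexLit := by decide

lemma pvAlt_eq (d c : String) :
    types_are_compatible_py_alt d c =
      !(PySem.Set.inter (pvIndexLit.getD d PySem.Set.empty)
                        (pvIndexLit.getD c PySem.Set.empty)).isEmpty := by
  unfold types_are_compatible_py_alt
  rw [pvIndexB_eq]

-- the list of group indices whose group mentions s (what the inverted index stores at s)
def pvIdx (s : String) : List Int :=
  (PySem.List.enumerate pvGroupsB).filterMap (fun p => if p.2.contains s then some p.1 else none)

lemma pvGetD_not_key (s : String) (h : s ∉ pvKeys) :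
    pvIndexLit.getD s PySem.Set.empty = PySem.Set.empty := by
  simp [pvKeys] at h
  obtain ⟨h1, h2, h3, h4, h5, h6, h7, h8, h9, h10, h11, h12, h13, h14, h15, h16, h17, h18⟩ := h
  simp [pvIndexLit, PySem.Dict.getD, PySem.Dict.get?, Ne.symm h1, Ne.symm h2, Ne.symm h3, Ne.symm h4, Ne.symm h5, Ne.symm h6, Ne.symm h7, Ne.symm h8, Ne.symm h9, Ne.symm h10, Ne.symm h11, Ne.symm h12, Ne.symm h13, Ne.symm h14, Ne.symm h15, Ne.symm h16, Ne.symm h17, Ne.symm h18]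

lemma pvGetD_eq_pvIdx (s : String) : pvIndexLit.getD s PySem.Set.empty = pvIdx s := by
  by_cases h : s ∈ pvKeys
  · simp [pvKeys] at h
    rcases h with rfl|rfl|rfl|rfl|rfl|rfl|rfl|rfl|rfl|rfl|rfl|rfl|rfl|rfl|rfl|rfl|rfl|rfl <;> decide
  · rw [pvGetD_not_key s h]
    simp [pvKeys] at h
    obtain ⟨h1, h2, h3, h4, h5, h6, h7, h8, h9, h10, h11, h12, h13, h14, h15, h16, h17, h18⟩ := h
    simp [pvIdx, pvGroupsB, PySem.List.enumerate, PySem.Set.empty, h1, h2, h3, h4, h5, h6, h7, h8, h9, h10, h11, h12, h13, h14, h15, h16, h17, h18]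

lemma pvLoopA_eq_any (d c : String) (gs : List (PySem.Set String)) :
    pvLoopA d c gs = gs.any (fun g => PySem.Set.contains g d && PySem.Set.contains g c) := by
  induction gs with
  | nil => rfl
  | cons g rest ih =>
    rw [pvLoopA, List.any_cons, ← ih]
    split_ifs with h
    · rw [h, Bool.true_or]
    · rw [Bool.not_eq_true] at h
      rw [h, Bool.false_or]

lemma pvGroupsA_eq : pvGroupsA = pvGroupsB.map PySem.Set.ofList := by decide

lemma pvMem_pvIdx (s : String) (x : Int) :
    x ∈ pvIdx s ↔ ∃ (k : Nat) (hk : k < pvGroupsB.length), x = k ∧ s ∈ pvGroupsB[k] := by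
  simp only [pvIdx, List.mem_filterMap, PySem.List.mem_enumerate_iff]
  constructor
  · rintro ⟨p, ⟨k, hk, rfl⟩, hp⟩
    simp only at hp
    split_ifs at hp with hcnt
    · simp only [Option.some.injEq] at hp
      exact ⟨k, hk, by omega, by simpa using hcnt⟩
  · rintro ⟨k, hk, rfl, hs⟩
    exact ⟨((0 : Int) + (k : Int), pvGroupsB[k]), ⟨k, hk, rfl⟩, by simp [hs]⟩

-- ===== VERDICT (by name: the statement is the Claim_ definition above) =====
theorem types_are_compatible_py_spec : Claim_equal_types_are_compatible_py := by
  intro d c _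
  unfold Spec_types_are_compatible_py
  rw [pvAlt_eq, pvGetD_eq_pvIdx, pvGetD_eq_pvIdx, types_are_compatible_py, pvLoopA_eq_any,
      pvGroupsA_eq, Bool.eq_iff_iff]
  simp only [List.any_eq_true, List.mem_map, Bool.and_eq_true, PySem.Set.contains_iff,
    Bool.not_eq_true', List.isEmpty_eq_false_iff_exists_mem,
    PySem.Set.mem_inter, pvMem_pvIdx]
  constructor
  · rintro ⟨g, ⟨l, hl, rfl⟩, hd, hc⟩
    obtain ⟨k, hk, rfl⟩ := List.mem_iff_getElem.mp hl
    exact ⟨(k : Int), ⟨k, hk, rfl, by simpa using hd⟩, ⟨k, hk, rfl, by simpa using hc⟩⟩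
  · rintro ⟨x, ⟨k, hk, rfl, hd⟩, ⟨k', hk', hkk, hc⟩⟩
    have hkeq : k = k' := by exact_mod_cast hkk
    subst hkeq
    exact ⟨PySem.Set.ofList pvGroupsB[k], ⟨pvGroupsB[k], List.getElem_mem hk, rfl⟩,
           by simpa using hd, by simpa using hc⟩
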